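-- pv_equiv track=rewrite | github.com/Judongsung/algorithm | 백준/Gold/21608. 상어 초등학교/상어 초등학교.py | find_familiar_location
-- ===== SOURCE A (Python) =====
-- def find_familiar_location(n, board, empty_locations, favorites):
--     r_dirs = [-1, 0, 0, 1]
--     c_dirs = [0, -1, 1, 0]
--     max_familiar_idx = None
--     max_familiar_count = -1
--     max_broad_count = -1
--
--     for i, location in enumerate(empty_locations):
--         r, c = location
--         familiar_count = 0
--         broad_count = 0
--
--         for l in range(4):
--             r_dir = r_dirs[l]
--             c_dir = c_dirs[l]
--             if 0 <= r+r_dir < n and 0 <= c+c_dir < n: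
--                 side = board[r+r_dir][c+c_dir]
--
--                 if side in favorites:
--                     familiar_count += 1
--                 elif side == 0:
--                     broad_count += 1
--
--         if (familiar_count > max_familiar_count) or (familiar_count == max_familiar_count and broad_count > max_broad_count):
--             max_familiar_count = familiar_count
--             max_broad_count = broad_count
--             max_familiar_idx = i
--
--     return empty_locations.pop(max_familiar_idx)
-- ===== SOURCE B (Python) =====
-- def find_familiar_location(n, board, empty_locations, favorites):
--     # Staged-pass selection instead of a running lexicographic maximum:
--     # materialise each seat's in-grid neighbour values, count favourites by
--     # occurrence-counting over the favourite set, take max familiar, then max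
--     # broad among those, then the first index attaining both via list.index.
--     favs = set(favorites)
--
--     def neighbor_values(r, c):
--         vals = []
--         for rr, cc in ((r - 1, c), (r, c - 1), (r, c + 1), (r + 1, c)):
--             if 0 <= rr < n and 0 <= cc < n:
--                 vals.append(board[rr][cc])
--         return vals
--
--     neigh = [neighbor_values(r, c) for r, c in empty_locations]
--     fs = [sum(vals.count(x) for x in favs) for vals in neigh]
--     bs = [0 if 0 in favs else vals.count(0) for vals in neigh]
--     m1 = max(fs)
--     m2 = max(b for f, b in zip(fs, bs) if f == m1)
--     best = list(zip(fs, bs)).index((m1, m2))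
--     return empty_locations.pop(best)
-- ===== Notes on version B (the rewrite author's own statement) =====
-- stated objective: alternative
-- what changed: B replaces A's single pass with a running (familiar, broad) lexicographic maximum by staged passes: it materialises each seat's in-grid neighbour value list, counts familiars by iterating the favourite set and summing occurrence counts (instead of testing each neighbour for membership), then selects by three separate scans - max familiar, max broad among seats with that familiar count, and list.index of the first (max,max) pair.
import Mathlib
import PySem

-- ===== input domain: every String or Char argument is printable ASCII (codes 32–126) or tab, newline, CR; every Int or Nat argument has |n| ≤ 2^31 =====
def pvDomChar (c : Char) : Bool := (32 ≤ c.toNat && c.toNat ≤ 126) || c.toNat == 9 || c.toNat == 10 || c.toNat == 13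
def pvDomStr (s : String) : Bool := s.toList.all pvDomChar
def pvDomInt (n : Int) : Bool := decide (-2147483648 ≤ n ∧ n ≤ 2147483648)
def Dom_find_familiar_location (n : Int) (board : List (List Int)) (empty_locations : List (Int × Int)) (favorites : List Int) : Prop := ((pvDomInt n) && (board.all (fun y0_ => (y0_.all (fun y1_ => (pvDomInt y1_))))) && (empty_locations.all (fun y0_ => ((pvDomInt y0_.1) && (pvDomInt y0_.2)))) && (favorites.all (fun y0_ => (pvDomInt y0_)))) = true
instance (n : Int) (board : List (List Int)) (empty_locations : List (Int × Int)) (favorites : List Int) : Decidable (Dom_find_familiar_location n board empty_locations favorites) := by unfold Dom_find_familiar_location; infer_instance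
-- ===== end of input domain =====

-- B replaces A's single running lexicographic (familiar, broad) maximum pass by staged
-- passes: per-seat neighbour value lists, favourite counts obtained by iterating the
-- favourite set, then max / filtered max / list.index scans. Both A and B pop the chosen
-- seat from empty_locations (identical mutation); the equivalence proved is about the
-- return value.

-- ===== PORT A =====
def find_familiar_location (n : Int) (board : List (List Int)) (empty_locations : List (Int × Int)) (favorites : List Int) : Int × Int :=
  let r_dirs : List Int := [-1, 0, 0, 1]
  let c_dirs : List Int := [0, -1, 1, 0]
  let st :=
    (PySem.List.enumerate empty_locations 0).foldl
      (fun (st : Option Int × Int × Int) il =>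
        let r := il.2.1
        let c := il.2.2
        let fc :=
          (PySem.List.pyRange 0 4 1).foldl
            (fun (fb : Int × Int) l =>
              let r_dir := PySem.List.pyGetD r_dirs l 0
              let c_dir := PySem.List.pyGetD c_dirs l 0
              if 0 ≤ r + r_dir ∧ r + r_dir < n ∧ 0 ≤ c + c_dir ∧ c + c_dir < n then
                let side := PySem.List.pyGetD (PySem.List.pyGetD board (r + r_dir) []) (c + c_dir) 0
                if side ∈ favorites then (fb.1 + 1, fb.2)
                else if side = 0 then (fb.1, fb.2 + 1)
                else fb
              else fb)
            (0, 0)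
        if fc.1 > st.2.1 ∨ (fc.1 = st.2.1 ∧ fc.2 > st.2.2) then (some il.1, fc.1, fc.2) else st)
      (none, -1, -1)
  match st.1 with
  | some idx => ((PySem.List.pop? empty_locations idx).map (·.1)).getD (0, 0)
  | none => (0, 0)  -- Python: empty_locations.pop(None) raises TypeError (excluded by Pre_)

-- ===== PORT B =====
def find_familiar_location_alt (n : Int) (board : List (List Int)) (empty_locations : List (Int × Int)) (favorites : List Int) : Int × Int :=
  let favs := PySem.Set.ofList favorites
  let neighbor_values := fun (r c : Int) =>
    ([(r - 1, c), (r, c - 1), (r, c + 1), (r + 1, c)] : List (Int × Int)).foldl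
      (fun (vals : List Int) p =>
        if 0 ≤ p.1 ∧ p.1 < n ∧ 0 ≤ p.2 ∧ p.2 < n then
          vals ++ [PySem.List.pyGetD (PySem.List.pyGetD board p.1 []) p.2 0]
        else vals) []
  let neigh := empty_locations.map (fun rc => neighbor_values rc.1 rc.2)
  let fs := neigh.map (fun vals => (favs.map (fun x => (vals.count x : Int))).sum)
  let bs := neigh.map (fun vals => if (0 : Int) ∈ favs then (0 : Int) else (vals.count 0 : Int))
  match PySem.List.max? fs (fun v => v) with
  | none => (0, 0)  -- Python: max([]) raises ValueError (excluded by Pre_)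
  | some m1 =>
    match PySem.List.max? (((fs.zip bs).filter (fun p => p.1 == m1)).map (·.2)) (fun v => v) with
    | none => (0, 0)  -- unreachable: m1 is attained by some seat
    | some m2 =>
      match PySem.List.index? (fs.zip bs) (m1, m2) with
      | some best => ((PySem.List.pop? empty_locations (best : Int)).map (·.1)).getD (0, 0)
      | none => (0, 0)  -- unreachable: (m1, m2) is attained by some seat

-- ===== PRECONDITION & SPEC =====
-- Pre_ excludes exactly the inputs where the Python A raises: an empty empty_locations
-- (pop(None) → TypeError) and boards too small for an in-grid neighbour access (IndexError).
def Pre_find_familiar_location (n : Int) (board : List (List Int)) (empty_locations : List (Int × Int)) (favorites : List Int) : Prop :=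
  empty_locations ≠ [] ∧
  ∀ p ∈ empty_locations, ∀ d ∈ ([(-1, 0), (0, -1), (0, 1), (1, 0)] : List (Int × Int)),
    (0 ≤ p.1 + d.1 ∧ p.1 + d.1 < n ∧ 0 ≤ p.2 + d.2 ∧ p.2 + d.2 < n) →
    p.1 + d.1 < (board.length : Int) ∧
    p.2 + d.2 < ((board.getD (p.1 + d.1).toNat []).length : Int)
instance (n : Int) (board : List (List Int)) (empty_locations : List (Int × Int)) (favorites : List Int) : Decidable (Pre_find_familiar_location n board empty_locations favorites) := by unfold Pre_find_familiar_location; infer_instance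

def pvWitness_find_familiar_location : Int × List (List Int) × (List (Int × Int)) × List Int :=
  (1, [[0]], [(0, 0)], [])

def Spec_find_familiar_location (n : Int) (board : List (List Int)) (empty_locations : List (Int × Int)) (favorites : List Int) (out : Int × Int) : Prop := out = find_familiar_location_alt n board empty_locations favorites
instance (n : Int) (board : List (List Int)) (empty_locations : List (Int × Int)) (favorites : List Int) (out : Int × Int) : Decidable (Spec_find_familiar_location n board empty_locations favorites out) := by unfold Spec_find_familiar_location; infer_instance

-- ===== CLAIM (what is proved, stated in full; the proofs are below) =====
def Claim_equal_find_familiar_location : Prop := ∀ (n : Int) (board : List (List Int)) (empty_locations : List (Int × Int)) (favorites : List Int), Dom_find_familiar_location n board empty_locations favorites → Pre_find_familiar_location n board empty_locations favorites → Spec_find_familiar_location n board empty_locations favorites (find_familiar_location n board empty_locations favorites)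

-- ===== LEMMAS AND PROOFS =====

-- neighbour coordinates and cell value
def pvVal (board : List (List Int)) (p : Int × Int) : Int :=
  PySem.List.pyGetD (PySem.List.pyGetD board p.1 []) p.2 0
def pvCoords (r c : Int) : List (Int × Int) := [(r + -1, c + 0), (r + 0, c + -1), (r + 0, c + 1), (r + 1, c + 0)]

theorem pvCoords_eq (r c : Int) : pvCoords r c = [(r - 1, c), (r, c - 1), (r, c + 1), (r + 1, c)] := by
  have h1 : r + -1 = r - 1 := by ring
  have h2 : c + -1 = c - 1 := by ring
  have h3 : r + 0 = r := by ring
  have h4 : c + 0 = c := by ring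
  simp only [pvCoords, h1, h2, h3, h4]

-- in-grid neighbour VALUES of a seat (what B materialises)
def pvVals (n : Int) (board : List (List Int)) (r c : Int) : List Int :=
  ((pvCoords r c).filter (fun p => decide (0 ≤ p.1 ∧ p.1 < n ∧ 0 ≤ p.2 ∧ p.2 < n))).map (pvVal board)

-- familiar / broad counts of a value list
def pvF (favorites vals : List Int) : Int := (vals.countP (fun v => decide (v ∈ favorites)) : Int)
def pvB (favorites vals : List Int) : Int := (vals.countP (fun v => !decide (v ∈ favorites) && decide (v = 0)) : Int)

-- A's inner accumulator step
def pvAstep (n : Int) (board : List (List Int)) (favorites : List Int) (fb : Int × Int) (p : Int × Int) : Int × Int :=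
  if 0 ≤ p.1 ∧ p.1 < n ∧ 0 ≤ p.2 ∧ p.2 < n then
    if pvVal board p ∈ favorites then (fb.1 + 1, fb.2)
    else if pvVal board p = 0 then (fb.1, fb.2 + 1)
    else fb
  else fb

def pvScore (n : Int) (board : List (List Int)) (favorites : List Int) (rc : Int × Int) : Int × Int :=
  (pvF favorites (pvVals n board rc.1 rc.2), pvB favorites (pvVals n board rc.1 rc.2))

-- A's outer step on (index, score) pairs
def pvStep2 (st : Option Int × Int × Int) (is : Int × (Int × Int)) : Option Int × Int × Int :=
  if is.2.1 > st.2.1 ∨ (is.2.1 = st.2.1 ∧ is.2.2 > st.2.2) then (some is.1, is.2) else st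

-- lexicographic ≥ on score pairs
def pvLexGE (c s : Int × Int) : Prop := s.1 < c.1 ∨ (s.1 = c.1 ∧ s.2 ≤ c.2)

-- invariant: c is the lexicographic maximum of qs, first attained at index j
def pvInv (qs : List (Int × Int)) (j : Nat) (c : Int × Int) : Prop :=
  qs[j]? = some c ∧ (∀ s ∈ qs, pvLexGE c s) ∧ ∀ i, i < j → qs[i]? ≠ some c

theorem pvF_cons (favorites : List Int) (x : Int) (vals : List Int) :
    pvF favorites (x :: vals) = pvF favorites vals + (if x ∈ favorites then 1 else 0) := by
  unfold pvF
  rw [List.countP_cons]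
  by_cases h : x ∈ favorites <;> simp [h]

theorem pvB_cons (favorites : List Int) (x : Int) (vals : List Int) :
    pvB favorites (x :: vals) = pvB favorites vals + (if x ∉ favorites ∧ x = 0 then 1 else 0) := by
  unfold pvB
  rw [List.countP_cons]
  by_cases h : x ∈ favorites
  · simp [h]
  · by_cases hz : x = 0 <;> simp [h, hz]

theorem pvAfold_counts (n : Int) (board : List (List Int)) (favorites : List Int) :
    ∀ (ps : List (Int × Int)) (F B : Int),
    ps.foldl (pvAstep n board favorites) (F, B)
      = (F + pvF favorites ((ps.filter (fun p => decide (0 ≤ p.1 ∧ p.1 < n ∧ 0 ≤ p.2 ∧ p.2 < n))).map (pvVal board)),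
         B + pvB favorites ((ps.filter (fun p => decide (0 ≤ p.1 ∧ p.1 < n ∧ 0 ≤ p.2 ∧ p.2 < n))).map (pvVal board))) := by
  intro ps
  induction ps with
  | nil => intro F B; simp [pvF, pvB]
  | cons p t ih =>
      intro F B
      simp only [List.foldl_cons, List.filter_cons]
      by_cases hin : 0 ≤ p.1 ∧ p.1 < n ∧ 0 ≤ p.2 ∧ p.2 < n
      · rw [if_pos (decide_eq_true hin), List.map_cons]
        rcases hA : pvAstep n board favorites (F, B) p with ⟨F', B'⟩
        rw [ih F' B', pvF_cons, pvB_cons]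
        unfold pvAstep at hA
        rw [if_pos hin] at hA
        by_cases hf : pvVal board p ∈ favorites
        · rw [if_pos hf] at hA
          injection hA with h1 h2
          rw [if_pos hf, if_neg (by tauto : ¬ (pvVal board p ∉ favorites ∧ pvVal board p = 0))]
          rw [Prod.ext_iff]
          constructor <;> simp <;> omega
        · rw [if_neg hf] at hA
          by_cases hz : pvVal board p = 0
          · rw [if_pos hz] at hA
            injection hA with h1 h2
            rw [if_neg hf, if_pos ⟨hf, hz⟩]
            rw [Prod.ext_iff]
            constructor <;> simp <;> omega
          · rw [if_neg hz] at hA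
            injection hA with h1 h2
            rw [if_neg hf, if_neg (by tauto : ¬ (pvVal board p ∉ favorites ∧ pvVal board p = 0))]
            rw [Prod.ext_iff]
            constructor <;> simp <;> omega
      · rw [if_neg (by simp [hin])]
        rw [show pvAstep n board favorites (F, B) p = (F, B) from by simp [pvAstep, hin]]
        exact ih F B

-- A's inline inner loop, structurally: a fold of pvAstep over the neighbour coordinates
theorem pvInnerA_fold (n : Int) (board : List (List Int)) (favorites : List Int) (r c : Int) :
    (PySem.List.pyRange 0 4 1).foldl
      (fun (fb : Int × Int) l =>
        let r_dir := PySem.List.pyGetD ([-1, 0, 0, 1] : List Int) l 0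
        let c_dir := PySem.List.pyGetD ([0, -1, 1, 0] : List Int) l 0
        if 0 ≤ r + r_dir ∧ r + r_dir < n ∧ 0 ≤ c + c_dir ∧ c + c_dir < n then
          let side := PySem.List.pyGetD (PySem.List.pyGetD board (r + r_dir) []) (c + c_dir) 0
          if side ∈ favorites then (fb.1 + 1, fb.2)
          else if side = 0 then (fb.1, fb.2 + 1)
          else fb
        else fb)
      (0, 0) = (pvCoords r c).foldl (pvAstep n board favorites) (0, 0) := by
  rw [show PySem.List.pyRange 0 4 1 = [0, 1, 2, 3] from by decide]
  simp only [List.foldl_cons, List.foldl_nil]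
  rw [show PySem.List.pyGetD ([-1, 0, 0, 1] : List Int) 0 0 = -1 from by decide,
      show PySem.List.pyGetD ([-1, 0, 0, 1] : List Int) 1 0 = 0 from by decide,
      show PySem.List.pyGetD ([-1, 0, 0, 1] : List Int) 2 0 = 0 from by decide,
      show PySem.List.pyGetD ([-1, 0, 0, 1] : List Int) 3 0 = 1 from by decide,
      show PySem.List.pyGetD ([0, -1, 1, 0] : List Int) 0 0 = 0 from by decide,
      show PySem.List.pyGetD ([0, -1, 1, 0] : List Int) 1 0 = -1 from by decide,
      show PySem.List.pyGetD ([0, -1, 1, 0] : List Int) 2 0 = 1 from by decide,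
      show PySem.List.pyGetD ([0, -1, 1, 0] : List Int) 3 0 = 0 from by decide]
  simp only [pvCoords, pvAstep, pvVal, List.foldl_cons, List.foldl_nil]
  norm_num

-- A's inline inner loop computes the (familiar, broad) counts of the neighbour values
theorem pvInnerA_eq (n : Int) (board : List (List Int)) (favorites : List Int) (r c : Int) :
    (PySem.List.pyRange 0 4 1).foldl
      (fun (fb : Int × Int) l =>
        let r_dir := PySem.List.pyGetD ([-1, 0, 0, 1] : List Int) l 0
        let c_dir := PySem.List.pyGetD ([0, -1, 1, 0] : List Int) l 0
        if 0 ≤ r + r_dir ∧ r + r_dir < n ∧ 0 ≤ c + c_dir ∧ c + c_dir < n then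
          let side := PySem.List.pyGetD (PySem.List.pyGetD board (r + r_dir) []) (c + c_dir) 0
          if side ∈ favorites then (fb.1 + 1, fb.2)
          else if side = 0 then (fb.1, fb.2 + 1)
          else fb
        else fb)
      (0, 0) = pvScore n board favorites (r, c) := by
  rw [pvInnerA_fold, pvAfold_counts]
  simp [pvScore, pvVals]

-- B's neighbour-value loop materialises pvVals
theorem pvInnerB_eq (n : Int) (board : List (List Int)) (r c : Int) :
    ([(r - 1, c), (r, c - 1), (r, c + 1), (r + 1, c)] : List (Int × Int)).foldl
      (fun (vals : List Int) p =>
        if 0 ≤ p.1 ∧ p.1 < n ∧ 0 ≤ p.2 ∧ p.2 < n then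
          vals ++ [PySem.List.pyGetD (PySem.List.pyGetD board p.1 []) p.2 0]
        else vals) [] = pvVals n board r c := by
  rw [PySem.List.foldl_append_ite (p := fun p : Int × Int => 0 ≤ p.1 ∧ p.1 < n ∧ 0 ≤ p.2 ∧ p.2 < n)
      (f := fun p : Int × Int => PySem.List.pyGetD (PySem.List.pyGetD board p.1 []) p.2 0)]
  simp only [List.nil_append, pvVals, pvCoords_eq]
  rfl

-- sum of occurrence counts over the favourite SET = membership count (B's fs = A's familiar)
theorem pvIndicator_sum (S : List Int) (v : Int) (hnd : S.Nodup) :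
    (S.map (fun x => if x = v then (1 : Int) else 0)).sum = if v ∈ S then 1 else 0 := by
  induction S with
  | nil => simp
  | cons a s ihs =>
      rcases List.nodup_cons.mp hnd with ⟨ha, hnd'⟩
      rcases eq_or_ne a v with h | h
      · subst h
        have hz : (s.map (fun x => if x = a then (1 : Int) else 0)).sum = 0 := by
          apply List.sum_eq_zero
          intro x hx
          rcases List.mem_map.mp hx with ⟨y, hy, rfl⟩
          simp [show y ≠ a from fun hya => ha (hya ▸ hy)]
        simp [hz]
      · simp only [List.map_cons, List.sum_cons, List.mem_cons]
        rw [ihs hnd']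
        simp [Ne.symm h, h]

theorem pvSum_counts (favorites vals : List Int) :
    ((PySem.Set.ofList favorites).map (fun x => (vals.count x : Int))).sum = pvF favorites vals := by
  induction vals with
  | nil => simp [pvF]
  | cons v t ih =>
      have hcnt : ∀ x : Int, ((v :: t).count x : Int) = (t.count x : Int) + (if x = v then 1 else 0) := by
        intro x
        rcases eq_or_ne x v with h | h
        · simp [h]
        · simp [h, Ne.symm h]
      have hmap : (PySem.Set.ofList favorites).map (fun x => ((v :: t).count x : Int))
          = (PySem.Set.ofList favorites).map (fun x => (t.count x : Int) + (if x = v then 1 else 0)) := by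
        exact List.map_congr_left (fun x _ => hcnt x)
      rw [hmap, PySem.List.sum_map_add_int, ih,
          pvIndicator_sum _ _ (PySem.Set.nodup_ofList favorites), pvF_cons]
      by_cases hv : v ∈ favorites <;>
        simp [PySem.Set.mem_ofList favorites v, hv]

-- B's broad formula = A's elif count
theorem pvBroad_eq (favorites vals : List Int) :
    (if (0 : Int) ∈ PySem.Set.ofList favorites then (0 : Int) else (vals.count 0 : Int))
      = pvB favorites vals := by
  by_cases h0 : (0 : Int) ∈ favorites
  · rw [if_pos ((PySem.Set.mem_ofList favorites 0).mpr h0)]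
    unfold pvB
    rw [show (vals.countP (fun v => !decide (v ∈ favorites) && decide (v = 0))) = 0 from by
      rw [List.countP_eq_zero]
      intro v _
      by_cases hv : v = 0
      · subst hv; simp [h0]
      · simp [hv]]
    rfl
  · rw [if_neg (fun hmem => h0 ((PySem.Set.mem_ofList favorites 0).mp hmem))]
    unfold pvB
    rw [List.count_eq_countP]
    congr 1
    apply List.countP_congr
    intro v _
    by_cases hv : v = 0
    · subst hv; simp [h0]
    · simp [hv]

-- fold over enumerated locations = fold over enumerated scores
theorem pvEnumMap (score : Int × Int → Int × Int) :
    ∀ (l : List (Int × Int)) (k : Int) (init : Option Int × Int × Int),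
    (PySem.List.enumerate l k).foldl (fun st il => pvStep2 st (il.1, score il.2)) init
      = (PySem.List.enumerate (l.map score) k).foldl pvStep2 init := by
  intro l
  induction l with
  | nil => intro k init; rfl
  | cons x t ih =>
      intro k init
      simp only [List.map_cons, PySem.List.enumerate_cons, List.foldl_cons]
      exact ih (k + 1) _

-- the main loop preserves the first-lex-max invariant
theorem pvLoop : ∀ (ss qs : List (Int × Int)) (j : Nat) (c : Int × Int),
    pvInv qs j c →
    ∃ (j' : Nat) (c' : Int × Int),
      (PySem.List.enumerate ss (qs.length : Int)).foldl pvStep2 (some (j : Int), c) = (some (j' : Int), c')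
      ∧ pvInv (qs ++ ss) j' c' := by
  intro ss
  induction ss with
  | nil =>
      intro qs j c hinv
      exact ⟨j, c, rfl, by simpa using hinv⟩
  | cons sc ss ih =>
      intro qs j c hinv
      obtain ⟨h1, h2, h3⟩ := hinv
      have hjlt : j < qs.length := (List.getElem?_eq_some_iff.mp h1).1
      rw [PySem.List.enumerate_cons, List.foldl_cons]
      by_cases hgt : sc.1 > c.1 ∨ (sc.1 = c.1 ∧ sc.2 > c.2)
      · rw [show pvStep2 (some (j : Int), c) ((qs.length : Int), sc) = (some (qs.length : Int), sc) from by
          simp [pvStep2, hgt]]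
        have hinv' : pvInv (qs ++ [sc]) qs.length sc := by
          refine ⟨?_, ?_, ?_⟩
          · simp
          · intro x hx
            rcases List.mem_append.mp hx with hx | hx
            · have := h2 x hx
              unfold pvLexGE at *
              rcases hgt with hg | hg <;> omega
            · rcases List.mem_singleton.mp hx with rfl
              unfold pvLexGE
              omega
          · intro i hi hsome
            rw [List.getElem?_append_left hi] at hsome
            have hmem : sc ∈ qs := List.mem_of_getElem? hsome
            have := h2 sc hmem
            unfold pvLexGE at this
            rcases hgt with hg | hg <;> omega
        have := ih (qs ++ [sc]) qs.length sc hinv'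
        rw [show ((qs ++ [sc]).length : Int) = (qs.length : Int) + 1 from by simp] at this
        rw [show (qs ++ [sc]) ++ ss = qs ++ sc :: ss from by simp] at this
        exact this
      · rw [show pvStep2 (some (j : Int), c) ((qs.length : Int), sc) = (some (j : Int), c) from by
          simp [pvStep2, hgt]]
        have hinv' : pvInv (qs ++ [sc]) j c := by
          refine ⟨?_, ?_, ?_⟩
          · rw [List.getElem?_append_left hjlt]; exact h1
          · intro x hx
            rcases List.mem_append.mp hx with hx | hx
            · exact h2 x hx
            · rcases List.mem_singleton.mp hx with rfl
              unfold pvLexGE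
              omega
          · intro i hi
            rw [List.getElem?_append_left (hi.trans hjlt)]
            exact h3 i hi
        have := ih (qs ++ [sc]) j c hinv'
        rw [show ((qs ++ [sc]).length : Int) = (qs.length : Int) + 1 from by simp] at this
        rw [show (qs ++ [sc]) ++ ss = qs ++ sc :: ss from by simp] at this
        exact this

-- first extremal value of max? with identity key
theorem pvMax?_of {l : List Int} {m : Int} (hm : m ∈ l) (hmax : ∀ y ∈ l, y ≤ m) :
    PySem.List.max? l (fun v => v) = some m := by
  have hne : l ≠ [] := fun h => by simp [h] at hm
  rcases hmx : PySem.List.max? l (fun v => v) with _ | m0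
  · exact absurd ((PySem.List.max?_eq_none_iff l (fun v => v)).mp hmx) hne
  · have h1 : m0 ∈ l := PySem.List.max?_mem hmx
    have h2 := PySem.List.max?_isMax hmx
    have := h2 m hm
    have := hmax m0 h1
    simp only [Option.some.injEq]
    omega

theorem pvScore_nonneg (n : Int) (board : List (List Int)) (favorites : List Int) (rc : Int × Int) :
    0 ≤ (pvScore n board favorites rc).1 ∧ 0 ≤ (pvScore n board favorites rc).2 := by
  simp [pvScore, pvF, pvB]

-- extraction of B's three staged scans from the invariant
theorem pvExtract_m1 (scores : List (Int × Int)) (j : Nat) (c : Int × Int) (h : pvInv scores j c) :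
    PySem.List.max? (scores.map (·.1)) (fun v => v) = some c.1 := by
  obtain ⟨h1, h2, _⟩ := h
  have hc : c ∈ scores := List.mem_of_getElem? h1
  apply pvMax?_of
  · exact List.mem_map.mpr ⟨c, hc, rfl⟩
  · intro y hy
    rcases List.mem_map.mp hy with ⟨s, hs, rfl⟩
    have := h2 s hs
    unfold pvLexGE at this
    omega

theorem pvExtract_m2 (scores : List (Int × Int)) (j : Nat) (c : Int × Int) (h : pvInv scores j c) :
    PySem.List.max? ((scores.filter (fun p => p.1 == c.1)).map (·.2)) (fun v => v) = some c.2 := by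
  obtain ⟨h1, h2, _⟩ := h
  have hc : c ∈ scores := List.mem_of_getElem? h1
  apply pvMax?_of
  · exact List.mem_map.mpr ⟨c, List.mem_filter.mpr ⟨hc, by simp⟩, rfl⟩
  · intro y hy
    rcases List.mem_map.mp hy with ⟨s, hs, rfl⟩
    rcases List.mem_filter.mp hs with ⟨hsm, hseq⟩
    have hseq' : s.1 = c.1 := by simpa using hseq
    have := h2 s hsm
    unfold pvLexGE at this
    omega

theorem pvExtract_idx (scores : List (Int × Int)) (j : Nat) (c : Int × Int) (h : pvInv scores j c) :
    PySem.List.index? scores (c.1, c.2) = some j := by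
  obtain ⟨h1, h2, h3⟩ := h
  obtain ⟨hjlt, hgj⟩ := List.getElem?_eq_some_iff.mp h1
  rw [show ((c.1, c.2) : Int × Int) = c from rfl]
  apply (PySem.List.index?_eq_some_iff scores c j).mpr
  refine ⟨scores.take j, scores.drop (j + 1), ?_, ?_, ?_⟩
  · conv_lhs => rw [← List.take_append_drop j scores]
    rw [List.drop_eq_getElem_cons hjlt, hgj]
  · simpa using hjlt.le
  · intro hmem
    rcases List.mem_iff_getElem.mp hmem with ⟨i, hi, hie⟩
    have hij : i < j := by
      have := hi
      simp at this
      omega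
    apply h3 i hij
    rw [List.getElem?_eq_some_iff]
    exact ⟨hij.trans hjlt, by rw [← hie, List.getElem_take]⟩

-- ===== VERDICT (by name: the statement is the Claim_ definition above) =====
theorem find_familiar_location_spec : Claim_equal_find_familiar_location := by
  intro n board el favorites _ hpre
  obtain ⟨hne, -⟩ := hpre
  unfold Spec_find_familiar_location
  obtain ⟨p, t, rfl⟩ : ∃ p t, el = p :: t := by
    cases el with
    | nil => exact absurd rfl hne
    | cons a b => exact ⟨a, b, rfl⟩
  simp only [find_familiar_location, find_familiar_location_alt]
  -- A's outer loop is pvStep2 over the enumerated score list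
  have hstepA : (fun (st : Option Int × Int × Int) (il : Int × (Int × Int)) =>
      let r := il.2.1
      let c := il.2.2
      let fc :=
        (PySem.List.pyRange 0 4 1).foldl
          (fun (fb : Int × Int) l =>
            let r_dir := PySem.List.pyGetD ([-1, 0, 0, 1] : List Int) l 0
            let c_dir := PySem.List.pyGetD ([0, -1, 1, 0] : List Int) l 0
            if 0 ≤ r + r_dir ∧ r + r_dir < n ∧ 0 ≤ c + c_dir ∧ c + c_dir < n then
              let side := PySem.List.pyGetD (PySem.List.pyGetD board (r + r_dir) []) (c + c_dir) 0
              if side ∈ favorites then (fb.1 + 1, fb.2)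
              else if side = 0 then (fb.1, fb.2 + 1)
              else fb
            else fb)
          (0, 0)
      if fc.1 > st.2.1 ∨ (fc.1 = st.2.1 ∧ fc.2 > st.2.2) then (some il.1, fc.1, fc.2) else st)
      = (fun st il => pvStep2 st (il.1, pvScore n board favorites il.2)) := by
    funext st il
    simp only [pvStep2]
    rw [pvInnerA_eq]
  rw [hstepA, pvEnumMap (fun rc => pvScore n board favorites rc) (p :: t) 0 (none, -1, -1)]
  -- B's neighbour lists are pvVals
  have hstepB : (fun (rc : Int × Int) =>
      ([(rc.1 - 1, rc.2), (rc.1, rc.2 - 1), (rc.1, rc.2 + 1), (rc.1 + 1, rc.2)] : List (Int × Int)).foldl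
        (fun (vals : List Int) q =>
          if 0 ≤ q.1 ∧ q.1 < n ∧ 0 ≤ q.2 ∧ q.2 < n then
            vals ++ [PySem.List.pyGetD (PySem.List.pyGetD board q.1 []) q.2 0]
          else vals) [])
      = (fun rc : Int × Int => pvVals n board rc.1 rc.2) := by
    funext rc
    exact pvInnerB_eq n board rc.1 rc.2
  rw [hstepB]
  set scores : List (Int × Int) := (p :: t).map (fun rc => pvScore n board favorites rc) with hscores
  -- B's fs and bs are the two projections of the score list
  have hfs : ((p :: t).map (fun rc => pvVals n board rc.1 rc.2)).map
        (fun vals => ((PySem.Set.ofList favorites).map (fun x => (vals.count x : Int))).sum)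
      = scores.map (·.1) := by
    rw [hscores, List.map_map, List.map_map]
    apply List.map_congr_left
    intro rc _
    simp only [Function.comp]
    rw [pvSum_counts]
    rfl
  have hbs : ((p :: t).map (fun rc => pvVals n board rc.1 rc.2)).map
        (fun vals => if (0 : Int) ∈ PySem.Set.ofList favorites then (0 : Int) else (vals.count 0 : Int))
      = scores.map (·.2) := by
    rw [hscores, List.map_map, List.map_map]
    apply List.map_congr_left
    intro rc _
    simp only [Function.comp]
    rw [pvBroad_eq]
    rfl
  rw [hfs, hbs]
  have hzip : (scores.map (·.1)).zip (scores.map (·.2)) = scores := by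
    rw [List.zip_map']
    simp
  rw [hzip]
  -- run A's loop: the first seat always wins against (-1, -1), then pvLoop
  have hs0 : scores = pvScore n board favorites p :: t.map (fun rc => pvScore n board favorites rc) := by
    rw [hscores]; rfl
  have hnn := pvScore_nonneg n board favorites (p.1, p.2)
  have hfirst : pvStep2 (none, -1, -1) ((0 : Int), pvScore n board favorites p)
      = (some (0 : Int), pvScore n board favorites p) := by
    unfold pvStep2
    rw [if_pos (Or.inl (by
      have h1 := (pvScore_nonneg n board favorites (p.1, p.2)).1
      have h2 := (pvScore_nonneg n board favorites p).1
      simp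
      omega))]
  have hinv0 : pvInv [pvScore n board favorites p] 0 (pvScore n board favorites p) := by
    refine ⟨by simp, ?_, by omega⟩
    intro x hx
    rcases List.mem_singleton.mp hx with rfl
    unfold pvLexGE
    omega
  obtain ⟨j', c', hrun, hinv⟩ := pvLoop (t.map (fun rc => pvScore n board favorites rc))
      [pvScore n board favorites p] 0 (pvScore n board favorites p) hinv0
  rw [show ([pvScore n board favorites p] : List (Int × Int)).length = 1 from rfl] at hrun
  rw [show ([pvScore n board favorites p] : List (Int × Int))
        ++ t.map (fun rc => pvScore n board favorites rc)
      = scores from by rw [hs0]; rfl] at hinv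
  have hloopA : (PySem.List.enumerate scores 0).foldl pvStep2 (none, -1, -1) = (some (j' : Int), c') := by
    rw [hs0, PySem.List.enumerate_cons, List.foldl_cons, hfirst]
    rw [show ((0 : Int) + 1) = ((1 : Nat) : Int) from by norm_num]
    rw [show ((0 : Nat) : Int) = (0 : Int) from rfl] at hrun
    exact_mod_cast hrun
  rw [show PySem.List.enumerate ((p :: t).map (fun rc => pvScore n board favorites rc)) 0
      = PySem.List.enumerate scores 0 from by rw [hscores]]
  rw [hloopA]
  -- reduce B's three staged scans with the invariant
  simp only [pvExtract_m1 scores j' c' hinv, pvExtract_m2 scores j' c' hinv,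
    pvExtract_idx scores j' c' hinv]
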